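-- pv_equiv track=rewrite | github.com/Objectivitix/CCC-Solutions | 2021/j4a.py | is_fronted
-- ===== SOURCE A (Python) =====
-- def is_fronted(string, prefix):
--     it = iter(string)
--
--     if next(it) != prefix:
--         return False
--
--     continuing = True
--
--     for char in it:
--         if char != prefix:
--             continuing = False
--             continue
--
--         if char == prefix and not continuing:
--             return False
--
--     return True
-- ===== SOURCE B (Python) =====
-- def is_fronted(string, prefix):
--     i = 0
--     while i < len(string) and string[i] == prefix:
--         i += 1
--     if i == 0:
--         return False
--     return all(string[j] != prefix for j in range(i, len(string)))
-- ===== Notes on version B (the rewrite author's own statement) =====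
-- stated objective: simpler
-- what changed: B replaces A's stateful one-pass scan with a 'continuing' flag by two phases: count the leading run of prefix characters, then check the remainder contains none, returning False (not raising) on the empty string.
import Mathlib
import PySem

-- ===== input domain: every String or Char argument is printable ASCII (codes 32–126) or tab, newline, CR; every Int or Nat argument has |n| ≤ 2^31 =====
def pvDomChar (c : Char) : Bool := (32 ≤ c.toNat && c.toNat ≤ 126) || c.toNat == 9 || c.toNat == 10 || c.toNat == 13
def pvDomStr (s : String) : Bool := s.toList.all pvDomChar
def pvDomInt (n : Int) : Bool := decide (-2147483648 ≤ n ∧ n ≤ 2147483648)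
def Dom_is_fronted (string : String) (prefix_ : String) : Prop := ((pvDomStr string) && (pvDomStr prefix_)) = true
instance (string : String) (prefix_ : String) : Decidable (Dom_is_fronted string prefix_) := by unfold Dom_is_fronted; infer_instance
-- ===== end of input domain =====

-- B counts the leading run of prefix chars, then checks the rest has none (two phases instead of
-- A's stateful flag scan); same return value wherever A returns, B returns False where A raises.

-- ===== PORT A =====
-- A's for-loop over the remaining iterator, with the 'continuing' flag as loop state.
def isFrontedLoopA (prefix_ : String) : List Char → Bool → Bool
  | [], _ => true
  | c :: rest, continuing =>
    if String.ofList [c] ≠ prefix_ then isFrontedLoopA prefix_ rest false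
    else if String.ofList [c] = prefix_ ∧ ¬ continuing = true then false
    else isFrontedLoopA prefix_ rest continuing

def is_fronted (string : String) (prefix_ : String) : Bool :=
  match string.toList with
  | [] => false   -- Python raises StopIteration here; excluded by Pre_is_fronted
  | c :: rest =>
    if String.ofList [c] ≠ prefix_ then false
    else isFrontedLoopA prefix_ rest true

-- ===== PORT B =====
-- B's while-loop: count of the leading run of chars equal to prefix_.
def altRun (prefix_ : String) : List Char → Nat
  | [] => 0
  | c :: rest => if String.ofList [c] = prefix_ then altRun prefix_ rest + 1 else 0

def is_fronted_alt (string : String) (prefix_ : String) : Bool :=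
  let l := string.toList
  let i := altRun prefix_ l
  if i = 0 then false
  else (l.drop i).all (fun c => String.ofList [c] ≠ prefix_)

-- ===== PRECONDITION & SPEC =====
-- Pre_ excludes only the empty string, on which A raises StopIteration.
def Pre_is_fronted (string : String) (prefix_ : String) : Prop := string ≠ ""
instance (string : String) (prefix_ : String) : Decidable (Pre_is_fronted string prefix_) := by unfold Pre_is_fronted; infer_instance
def pvWitness_is_fronted : String × String := ("aab", "a")

def Spec_is_fronted (string : String) (prefix_ : String) (out : Bool) : Prop := out = is_fronted_alt string prefix_
instance (string : String) (prefix_ : String) (out : Bool) : Decidable (Spec_is_fronted string prefix_ out) := by unfold Spec_is_fronted; infer_instance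

-- ===== CLAIM (what is proved, stated in full; the proofs are below) =====
def Claim_equal_is_fronted : Prop := ∀ (string : String) (prefix_ : String), Dom_is_fronted string prefix_ → Pre_is_fronted string prefix_ → Spec_is_fronted string prefix_ (is_fronted string prefix_)

-- ===== LEMMAS AND PROOFS =====
theorem loopA_false (prefix_ : String) (l : List Char) :
    isFrontedLoopA prefix_ l false = l.all (fun c => String.ofList [c] ≠ prefix_) := by
  induction l with
  | nil => simp [isFrontedLoopA]
  | cons c rest ih =>
    by_cases h : String.ofList [c] = prefix_ <;>
      simp [isFrontedLoopA, h, ih]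

theorem loopA_true (prefix_ : String) (l : List Char) :
    isFrontedLoopA prefix_ l true =
      (l.drop (altRun prefix_ l)).all (fun c => String.ofList [c] ≠ prefix_) := by
  induction l with
  | nil => simp [isFrontedLoopA, altRun]
  | cons c rest ih =>
    by_cases h : String.ofList [c] = prefix_
    · simp [isFrontedLoopA, altRun, h, ih]
    · simp [isFrontedLoopA, altRun, h, loopA_false]

-- ===== VERDICT (by name: the statement is the Claim_ definition above) =====
theorem is_fronted_spec : Claim_equal_is_fronted := by
  intro string prefix_ _ hpre
  unfold Spec_is_fronted is_fronted is_fronted_alt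
  have hne : string.toList ≠ [] := by
    intro h
    exact hpre (by simpa [String.toList_eq_nil_iff] using h)
  cases hl : string.toList with
  | nil => exact absurd hl hne
  | cons c rest =>
    by_cases h : String.ofList [c] = prefix_
    · simp [h, altRun, loopA_true]
    · simp [h, altRun]
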